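-- pv_equiv track=rewrite | github.com/asharanees/Tokemizer-Project | backend/services/optimizer/toon_encoder.py | _optimize_header_row
-- ===== SOURCE A (Python) =====
-- from typing import Any, Dict, Iterable, List, Optional, Sequence, Set, Tuple
--
-- def _optimize_header_row(fields: Sequence[str]) -> List[str]:
--     if not fields:
--         return []
--
--     header_abbreviations = {
--         "identifier": "id",
--         "description": "desc",
--         "timestamp": "ts",
--         "quantity": "qty",
--         "reference": "ref",
--         "configuration": "cfg",
--         "enabled": "on",
--         "disabled": "off",
--     }
--
--     optimized: List[str] = []
--     seen: Set[str] = set()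
--
--     for field in fields:
--         lower = field.lower()
--         candidate = header_abbreviations.get(lower, field)
--         if len(candidate) >= len(field):
--             candidate = field
--         elif field.isupper():
--             candidate = candidate.upper()
--         elif field[:1].isupper():
--             candidate = candidate.capitalize()
--
--         if candidate in seen:
--             return list(fields)
--         seen.add(candidate)
--         optimized.append(candidate)
--
--     return optimized
-- ===== SOURCE B (Python) =====
-- from typing import Dict, List, Sequence
--
-- _HEADER_ABBREVIATIONS: Dict[str, str] = {
--     "identifier": "id",
--     "description": "desc",
--     "timestamp": "ts",
--     "quantity": "qty",
--     "reference": "ref",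
--     "configuration": "cfg",
--     "enabled": "on",
--     "disabled": "off",
-- }
--
--
-- def _recase(field: str, abbrev: str) -> str:
--     if len(abbrev) >= len(field):
--         return field
--     if field.isupper():
--         return abbrev.upper()
--     if field[:1].isupper():
--         return abbrev.capitalize()
--     return abbrev
--
--
-- def _optimize_header_row(fields: Sequence[str]) -> List[str]:
--     # Stage 1: dictionary lookups for every field.
--     looked_up = [_HEADER_ABBREVIATIONS.get(f.lower(), f) for f in fields]
--     # Stage 2: restore the original field's casing on each abbreviation.
--     candidates = [_recase(f, c) for f, c in zip(fields, looked_up)]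
--     # Stage 3: collision detection by sorting and scanning adjacent pairs.
--     ordered = sorted(candidates)
--     if any(x == y for x, y in zip(ordered, ordered[1:])):
--         return list(fields)
--     return candidates
-- ===== Notes on version B (the rewrite author's own statement) =====
-- stated objective: alternative
-- what changed: B is staged: one pass of dictionary lookups, one zip pass restoring the original casing, then collision detection by SORTING the candidates and scanning adjacent pairs for an equal neighbour (returning list(fields) on any duplicate), replacing A's single loop with an incrementally maintained 'seen' set, in-loop membership test and early return.
import Mathlib
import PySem

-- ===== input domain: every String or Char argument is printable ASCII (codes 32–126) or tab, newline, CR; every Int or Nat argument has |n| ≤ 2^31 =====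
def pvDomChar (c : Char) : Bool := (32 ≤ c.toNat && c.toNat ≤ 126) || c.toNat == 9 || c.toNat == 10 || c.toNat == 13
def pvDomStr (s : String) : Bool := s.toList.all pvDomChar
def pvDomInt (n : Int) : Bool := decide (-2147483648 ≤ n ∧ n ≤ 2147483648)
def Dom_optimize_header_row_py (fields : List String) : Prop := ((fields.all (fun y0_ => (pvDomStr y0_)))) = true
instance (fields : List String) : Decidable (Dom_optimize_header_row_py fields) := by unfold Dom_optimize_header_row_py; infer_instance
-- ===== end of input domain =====

-- B works in staged passes (lookup, recasing) and detects collisions by sorting the candidates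
-- and scanning adjacent pairs, instead of A's single loop with an incrementally maintained
-- seen-set and an in-loop early return.

-- str.isupper() ported by hand (exact on ASCII: cased characters are exactly the letters):
-- at least one cased character and no lowercase one.
def pyStrIsupper (cs : List Char) : Bool :=
  cs.any PySem.Chars.isalpha && cs.all (fun c => !(PySem.Chars.islower c))

-- str.capitalize() ported by hand (exact on ASCII): first char uppercased, rest lowercased.
def pyCapitalize (s : String) : String :=
  match s.toList with
  | [] => ""
  | c :: rest => String.ofList (PySem.Chars.upperChar c :: rest.map PySem.Chars.lowerChar)

def headerAbbrevs : PySem.Dict String String :=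
  PySem.Dict.ofList
    [("identifier", "id"), ("description", "desc"), ("timestamp", "ts"),
     ("quantity", "qty"), ("reference", "ref"), ("configuration", "cfg"),
     ("enabled", "on"), ("disabled", "off")]

-- ===== PORT A =====
-- the 'for field in fields' loop with the early 'return list(fields)' on a seen candidate
def optimizeLoopA (fields : List String) : List String → PySem.Set String → List String → List String
  | [], _, optimized => optimized
  | field :: rest, seen, optimized =>
    let lower := PySem.Str.lower field
    let candidate0 := PySem.Dict.getD headerAbbrevs lower field
    let candidate :=
      if PySem.Str.len field ≤ PySem.Str.len candidate0 then field
      else if pyStrIsupper field.toList then PySem.Str.upper candidate0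
      else if pyStrIsupper (PySem.Chars.slice field.toList none (some 1)) then pyCapitalize candidate0
      else candidate0
    if PySem.Set.contains seen candidate then fields
    else optimizeLoopA fields rest (PySem.Set.add seen candidate) (optimized ++ [candidate])

def optimize_header_row_py (fields : List String) : List String :=
  if fields = [] then []
  else optimizeLoopA fields fields PySem.Set.empty []

-- ===== PORT B =====
def recase (field ab : String) : String :=
  if PySem.Str.len field ≤ PySem.Str.len ab then field
  else if pyStrIsupper field.toList then PySem.Str.upper ab
  else if pyStrIsupper (PySem.Chars.slice field.toList none (some 1)) then pyCapitalize ab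
  else ab

def optimize_header_row_py_alt (fields : List String) : List String :=
  let lookedUp := fields.map (fun f => PySem.Dict.getD headerAbbrevs (PySem.Str.lower f) f)
  let candidates := (fields.zip lookedUp).map (fun p => recase p.1 p.2)
  let ordered := PySem.List.sorted candidates (fun x => x) false
  if (ordered.zip ordered.tail).any (fun p => p.1 == p.2) then fields
  else candidates

-- ===== PRECONDITION & SPEC =====
def Spec_optimize_header_row_py (fields : List String) (out : List String) : Prop := out = optimize_header_row_py_alt fields
instance (fields : List String) (out : List String) : Decidable (Spec_optimize_header_row_py fields out) := by unfold Spec_optimize_header_row_py; infer_instance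

-- ===== CLAIM (what is proved, stated in full; the proofs are below) =====
def Claim_equal_optimize_header_row_py : Prop := ∀ (fields : List String), Dom_optimize_header_row_py fields → Spec_optimize_header_row_py fields (optimize_header_row_py fields)

-- ===== LEMMAS AND PROOFS =====

-- the per-field candidate both programs compute (proof-side name only)
def candOf (f : String) : String :=
  recase f (PySem.Dict.getD headerAbbrevs (PySem.Str.lower f) f)

-- a ≤-sorted list has no equal adjacent pair iff it has no duplicates at all
lemma adjacent_dup_iff (l : List String) (h : l.Pairwise (· ≤ ·)) :
    ((l.zip l.tail).any (fun p => p.1 == p.2)) = false ↔ l.Nodup := by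
  induction l with
  | nil => simp
  | cons a l ih =>
    rcases l with _ | ⟨b, t⟩
    · simp
    · have hpw := List.pairwise_cons.mp h
      have hab : a ≤ b := hpw.1 b List.mem_cons_self
      have hpw' := List.pairwise_cons.mp hpw.2
      simp only [List.tail_cons] at ih
      simp only [List.tail_cons, List.zip_cons_cons, List.any_cons,
        Bool.or_eq_false_iff, beq_eq_false_iff_ne, ne_eq, List.nodup_cons]
      rw [ih hpw.2]
      simp only [List.nodup_cons]
      constructor
      · rintro ⟨hne, hnd⟩
        refine ⟨?_, hnd⟩
        have hlt : a < b := lt_of_le_of_ne hab hne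
        intro hmem
        rcases List.mem_cons.mp hmem with rfl | hmt
        · exact hne rfl
        · exact absurd (hlt.trans_le (hpw'.1 a hmt)) (lt_irrefl a)
      · rintro ⟨hnm, hnd⟩
        exact ⟨fun e => hnm (e ▸ List.mem_cons_self), hnd⟩

lemma optimizeLoopA_spec (fields : List String) :
    ∀ (rest opt : List String), opt.Nodup →
      optimizeLoopA fields rest opt opt =
        if (opt ++ rest.map candOf).Nodup then opt ++ rest.map candOf else fields := by
  intro rest
  induction rest with
  | nil => intro opt h; simp [optimizeLoopA, h]
  | cons f rest ih =>
    intro opt h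
    show (if PySem.Set.contains opt (candOf f) then fields
      else optimizeLoopA fields rest (PySem.Set.add opt (candOf f)) (opt ++ [candOf f])) = _
    by_cases hmem : candOf f ∈ opt
    · rw [if_pos (by simpa [PySem.Set.contains_iff] using hmem)]
      have hnot : ¬ (opt ++ List.map candOf (f :: rest)).Nodup := by
        simp only [List.map_cons, List.nodup_append]
        rintro ⟨-, -, hdisj⟩
        exact hdisj _ hmem _ List.mem_cons_self rfl
      simp only [List.map_cons] at hnot ⊢
      rw [if_neg hnot]
    · rw [if_neg (by simpa [PySem.Set.contains_iff] using hmem)]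
      rw [PySem.Set.add_of_not_mem hmem]
      have h' : (opt ++ [candOf f]).Nodup := by
        simp only [List.nodup_append, List.nodup_cons, List.not_mem_nil, not_false_iff,
          List.nodup_nil, List.mem_singleton, true_and]
        exact ⟨h, fun a ha b hb => by subst hb; exact fun e => hmem (e ▸ ha)⟩
      rw [ih (opt ++ [candOf f]) h']
      simp [List.append_assoc]

lemma alt_eq (fields : List String) :
    optimize_header_row_py_alt fields =
      if (fields.map candOf).Nodup then fields.map candOf else fields := by
  have hcand : (fields.zip (fields.map
        (fun f => PySem.Dict.getD headerAbbrevs (PySem.Str.lower f) f))).map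
          (fun p => recase p.1 p.2) = fields.map candOf := by
    induction fields with
    | nil => rfl
    | cons f fs ihf => simp only [List.map_cons, List.zip_cons_cons, ihf]; rfl
  show (if ((PySem.List.sorted ((fields.zip _).map _) (fun x => x) false).zip
        (PySem.List.sorted ((fields.zip _).map _) (fun x => x) false).tail).any
          (fun p => p.1 == p.2) = true then fields else (fields.zip _).map _) = _
  rw [hcand]
  set c := fields.map candOf with hc
  set s := PySem.List.sorted c (fun x => x) false with hs
  have hperm : s.Perm c := PySem.List.sorted_perm c (fun x => x) false
  have hpw : s.Pairwise (· ≤ ·) := by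
    simpa using PySem.List.sorted_pairwise c (fun x => x)
  have hiff := adjacent_dup_iff s hpw
  by_cases hnd : c.Nodup
  · rw [if_pos hnd, if_neg (by simp [hiff.mpr (hperm.nodup_iff.mpr hnd)])]
  · have : ((s.zip s.tail).any (fun p => p.1 == p.2)) = true := by
      rcases Bool.eq_false_or_eq_true ((s.zip s.tail).any (fun p => p.1 == p.2)) with ht | hf
      · exact ht
      · exact absurd (hperm.nodup_iff.mp (hiff.mp hf)) hnd
    rw [if_pos this, if_neg hnd]

-- ===== VERDICT (by name: the statement is the Claim_ definition above) =====
theorem optimize_header_row_py_spec : Claim_equal_optimize_header_row_py := by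
  intro fields _
  show optimize_header_row_py fields = optimize_header_row_py_alt fields
  unfold optimize_header_row_py
  rw [alt_eq]
  by_cases hnil : fields = []
  · subst hnil; simp
  · rw [if_neg hnil]
    have := optimizeLoopA_spec fields fields [] List.nodup_nil
    simpa using this
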